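-- pv_equiv track=rewrite | github.com/GitNMLee/Console2048 | 2048.py | shift_right
-- ===== SOURCE A (Python) =====
-- num_of_rows = 4
--
-- num_of_cols = 4
--
-- def swap(r1,c1,r2,c2,board):
--     # Given two coordinates on the 2D board, swap them
--     temp = board[r1][c1]
--     board[r1][c1] = board[r2][c2]
--     board[r2][c2] = temp
--     return board
--
-- def shift_right(board):
--     # Shift all cells to the right side of the board
--     for row in range(num_of_rows):
--         for col in range(num_of_cols-1, 0, -1):
--             if (board[row][col] == 0):
--                 # If cell is empty
--                 search_col = col - 1
--                 while (search_col != -1):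
--                     # Search for non-empty cells to swap
--                     if (board[row][search_col] != 0):
--                         board = swap(row,col,row,search_col,board)
--                         break
--                     search_col -= 1
--     # Return modified board
--     return board
-- ===== SOURCE B (Python) =====
-- num_of_rows = 4
--
-- num_of_cols = 4
--
-- def shift_right(board):
--     # Shift all cells to the right side of the board (simpler: per-row compaction
--     # via slice assignment instead of swap-search loops)
--     for row in range(num_of_rows):
--         r = board[row]
--         vals = [r[c] for c in range(num_of_cols) if r[c] != 0]
--         r[0:num_of_cols] = [0] * (num_of_cols - len(vals)) + vals
--     return board
-- ===== Notes on version B (the rewrite author's own statement) =====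
-- stated objective: simpler
-- what changed: Replaces A's nested swap-search loops (for each empty cell scan left for a value to swap in) with a per-row rebuild: collect the nonzero cells of columns 0-3 in order and slice-assign zeros followed by them back into the row.
import Mathlib
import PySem

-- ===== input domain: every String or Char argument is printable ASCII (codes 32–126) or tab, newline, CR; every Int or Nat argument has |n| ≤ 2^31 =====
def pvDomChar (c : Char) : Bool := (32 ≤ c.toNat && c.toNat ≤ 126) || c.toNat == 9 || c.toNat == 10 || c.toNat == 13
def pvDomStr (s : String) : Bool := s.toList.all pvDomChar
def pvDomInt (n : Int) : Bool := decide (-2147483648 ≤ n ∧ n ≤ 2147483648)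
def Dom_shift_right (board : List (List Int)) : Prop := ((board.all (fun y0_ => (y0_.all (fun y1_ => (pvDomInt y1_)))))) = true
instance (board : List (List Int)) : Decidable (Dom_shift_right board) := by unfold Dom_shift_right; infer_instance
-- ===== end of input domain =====

-- B replaces A's swap-search inner loops by a per-row compaction (collect the
-- nonzero cells, rebuild the row as zeros ++ nonzeros) — objective: simpler.
-- Both Pythons mutate `board` in place and return it; the equivalence proved
-- here is about the returned value.

-- ===== PORT A =====
-- board[r][c] (indices are Nat here: under Pre_ every index A uses is in 0..3
-- and in range, so Nat indexing is exact on the admitted inputs)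
def pvCell (b : List (List Int)) (r c : Nat) : Int := (b.getD r []).getD c 0
-- board[r][c] = x
def pvSetCell (b : List (List Int)) (r c : Nat) (x : Int) : List (List Int) :=
  b.modify r (fun row => row.set c x)

def swapA (r1 c1 r2 c2 : Nat) (b : List (List Int)) : List (List Int) :=
  let temp := pvCell b r1 c1
  let b1 := pvSetCell b r1 c1 (pvCell b r2 c2)
  pvSetCell b1 r2 c2 temp

-- the `while search_col != -1` loop; sc starts at col-1 ≥ 0 and decreases by 1,
-- so the loop stops exactly when sc would pass below 0 (Python's -1 test)
def searchLoopA (row col : Nat) (b : List (List Int)) (sc : Nat) : List (List Int) :=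
  if pvCell b row sc ≠ 0 then swapA row col row sc b
  else match sc with
    | 0 => b
    | k + 1 => searchLoopA row col b k

def shift_right (board : List (List Int)) : List (List Int) :=
  List.foldl (fun b row =>
    List.foldl (fun b col =>
      if pvCell b row col = 0 then searchLoopA row col b (col - 1) else b)
      b [3, 2, 1])
    board [0, 1, 2, 3]

-- ===== PORT B =====
def shift_right_alt (board : List (List Int)) : List (List Int) :=
  List.foldl (fun b row =>
    let r := b.getD row []
    let vals := List.filterMap
      (fun c => if r.getD c 0 ≠ 0 then some (r.getD c 0) else none) [0, 1, 2, 3]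
    b.set row (List.replicate (4 - vals.length) 0 ++ vals ++ r.drop 4))
    board ([0, 1, 2, 3] : List Nat)

-- ===== PRECONDITION & SPEC =====
-- exactly the inputs where Python A returns: A always reads board[row][3] for
-- row in 0..3, so it raises IndexError iff there are fewer than 4 rows or one
-- of the first 4 rows has fewer than 4 cells
def Pre_shift_right (board : List (List Int)) : Prop :=
  4 ≤ board.length ∧ ∀ r ∈ board.take 4, 4 ≤ r.length
instance (board : List (List Int)) : Decidable (Pre_shift_right board) := by
  unfold Pre_shift_right; infer_instance

def pvWitness_shift_right : List (List Int) :=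
  [[0, 2, 0, 2], [1, 1, 1, 1], [0, 0, 0, 0], [4, 0, 0, 8]]

def Spec_shift_right (board : List (List Int)) (out : List (List Int)) : Prop := out = shift_right_alt board
instance (board : List (List Int)) (out : List (List Int)) : Decidable (Spec_shift_right board out) := by unfold Spec_shift_right; infer_instance

-- ===== CLAIM (what is proved, stated in full; the proofs are below) =====
def Claim_equal_shift_right : Prop := ∀ (board : List (List Int)), Dom_shift_right board → Pre_shift_right board → Spec_shift_right board (shift_right board)

-- ===== LEMMAS AND PROOFS =====

-- per-row versions of A's inner computation
def rCell (r : List Int) (c : Nat) : Int := r.getD c 0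
def rSearch (r : List Int) (col sc : Nat) : List Int :=
  if rCell r sc ≠ 0 then (r.set col (rCell r sc)).set sc (rCell r col)
  else match sc with
    | 0 => r
    | k + 1 => rSearch r col k
def rStep (r : List Int) (col : Nat) : List Int :=
  if rCell r col = 0 then rSearch r col (col - 1) else r
def rowA (r : List Int) : List Int := List.foldl rStep r [3, 2, 1]
def rowB (r : List Int) : List Int :=
  let vals := List.filterMap
    (fun c => if r.getD c 0 ≠ 0 then some (r.getD c 0) else none) [0, 1, 2, 3]
  List.replicate (4 - vals.length) 0 ++ vals ++ r.drop 4

@[simp] lemma rCell_def (r : List Int) (c : Nat) : rCell r c = r.getD c 0 := rfl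

lemma getD_set_self (b : List (List Int)) (i : Nat) (r : List Int) (h : i < b.length) :
    (b.set i r).getD i [] = r := by
  simp [List.getD, h]

lemma getD_eq (b : List (List Int)) (i : Nat) (h : i < b.length) :
    b.getD i [] = b[i] := by
  simp [List.getD, List.getElem?_eq_getElem h]

lemma set_getD_self (b : List (List Int)) (i : Nat) (h : i < b.length) :
    b.set i (b.getD i []) = b := by
  rw [getD_eq b i h]; exact List.set_getElem_self h

lemma modify_eq_set (b : List (List Int)) (i : Nat) (f : List Int → List Int) (h : i < b.length) :
    b.modify i f = b.set i (f b[i]) := by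
  induction b generalizing i with
  | nil => simp at h
  | cons x xs ih =>
      cases i with
      | zero => simp [List.modify]
      | succ k => simpa [List.modify] using ih k (by simpa using h)

lemma pvSetCell_eq (b : List (List Int)) (i c : Nat) (x : Int) (h : i < b.length) :
    pvSetCell b i c x = b.set i ((b.getD i []).set c x) := by
  rw [pvSetCell, modify_eq_set b i _ h, getD_eq b i h]

lemma swapA_eq (b : List (List Int)) (i c1 c2 : Nat) (h : i < b.length) :
    swapA i c1 i c2 b
      = b.set i (((b.getD i []).set c1 ((b.getD i []).getD c2 0)).set c2 ((b.getD i []).getD c1 0)) := by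
  have h1 : i < (b.set i ((b.getD i []).set c1 ((b.getD i []).getD c2 0))).length := by
    simpa using h
  simp only [swapA, pvCell]
  rw [pvSetCell_eq b i c1 _ h, pvSetCell_eq _ i c2 _ h1, getD_set_self b i _ h, List.set_set]

lemma searchLoopA_eq (i col : Nat) (b : List (List Int)) (sc : Nat) (h : i < b.length) :
    searchLoopA i col b sc = b.set i (rSearch (b.getD i []) col sc) := by
  induction sc with
  | zero =>
      rw [searchLoopA, rSearch]
      by_cases hc : (b.getD i []).getD 0 0 ≠ 0
      · simp only [pvCell, rCell_def]
        rw [if_pos hc, if_pos hc, swapA_eq b i col 0 h]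
      · simp only [pvCell, rCell_def]
        rw [if_neg hc, if_neg hc, set_getD_self b i h]
  | succ k ih =>
      rw [searchLoopA, rSearch]
      by_cases hc : (b.getD i []).getD (k + 1) 0 ≠ 0
      · simp only [pvCell, rCell_def]
        rw [if_pos hc, if_pos hc, swapA_eq b i col (k + 1) h]
      · simp only [pvCell, rCell_def]
        rw [if_neg hc, if_neg hc, ih]

lemma colFold_eq (i : Nat) (b : List (List Int)) (cols : List Nat) (h : i < b.length) :
    List.foldl (fun b col =>
        if pvCell b i col = 0 then searchLoopA i col b (col - 1) else b) b cols
      = b.set i (List.foldl rStep (b.getD i []) cols) := by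
  induction cols generalizing b with
  | nil => simp only [List.foldl_nil]; exact (set_getD_self b i h).symm
  | cons c cs ih =>
      simp only [List.foldl_cons]
      have hstep : (if pvCell b i c = 0 then searchLoopA i c b (c - 1) else b)
          = b.set i (rStep (b.getD i []) c) := by
        rw [rStep]
        by_cases hc : (b.getD i []).getD c 0 = 0
        · simp only [pvCell, rCell_def]
          rw [if_pos hc, if_pos hc, searchLoopA_eq i c b (c - 1) h]
        · simp only [pvCell, rCell_def]
          rw [if_neg hc, if_neg hc, set_getD_self b i h]
      rw [hstep, ih _ (by simpa using h), getD_set_self b i _ h, List.set_set]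

def outerA (b : List (List Int)) (row : Nat) : List (List Int) :=
  List.foldl (fun b col =>
    if pvCell b row col = 0 then searchLoopA row col b (col - 1) else b) b [3, 2, 1]

lemma outerA_eq (i : Nat) (b : List (List Int)) (h : i < b.length) :
    outerA b i = b.set i (rowA (b.getD i [])) := colFold_eq i b [3, 2, 1] h

lemma rowFold_eq (b : List (List Int)) (rs : List Nat) (h : ∀ i ∈ rs, i < b.length) :
    List.foldl outerA b rs
    = List.foldl (fun b row => b.set row (rowA (b.getD row []))) b rs := by
  induction rs generalizing b with
  | nil => rfl
  | cons i rest ih =>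
      simp only [List.foldl_cons]
      rw [outerA_eq i b (h i (by simp))]
      exact ih _ (fun j hj => by simpa using h j (by simp [hj]))

lemma shiftA_eq (b : List (List Int)) (h : 4 ≤ b.length) :
    shift_right b = List.foldl (fun b row => b.set row (rowA (b.getD row []))) b [0, 1, 2, 3] := by
  have hdef : shift_right b = List.foldl outerA b [0, 1, 2, 3] := rfl
  rw [hdef]
  exact rowFold_eq b [0, 1, 2, 3] (by intro i hi; simp at hi; rcases hi with rfl | rfl | rfl | rfl <;> omega)

lemma rowAB (a b c d : Int) (t : List Int) :
    rowA (a :: b :: c :: d :: t) = rowB (a :: b :: c :: d :: t) := by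
  by_cases ha : a = 0 <;> by_cases hb : b = 0 <;> by_cases hc : c = 0 <;> by_cases hd : d = 0 <;>
    simp [rowA, rowB, rStep, rSearch, rCell, ha, hb, hc, hd]

lemma rowAB' (r : List Int) (h : 4 ≤ r.length) : rowA r = rowB r := by
  match r, h with
  | a :: b :: c :: d :: t, _ => exact rowAB a b c d t

-- ===== VERDICT (by name: the statement is the Claim_ definition above) =====
theorem shift_right_spec : Claim_equal_shift_right := by
  intro board _ hpre
  obtain ⟨hlen, hrows⟩ := hpre
  unfold Spec_shift_right
  match board, hlen with
  | r0 :: r1 :: r2 :: r3 :: rest, _ =>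
    have h0 : 4 ≤ r0.length := hrows r0 (by simp [List.take])
    have h1 : 4 ≤ r1.length := hrows r1 (by simp [List.take])
    have h2 : 4 ≤ r2.length := hrows r2 (by simp [List.take])
    have h3 : 4 ≤ r3.length := hrows r3 (by simp [List.take])
    rw [shiftA_eq (r0 :: r1 :: r2 :: r3 :: rest) (by simp)]
    show rowA r0 :: rowA r1 :: rowA r2 :: rowA r3 :: rest
        = shift_right_alt (r0 :: r1 :: r2 :: r3 :: rest)
    rw [rowAB' r0 h0, rowAB' r1 h1, rowAB' r2 h2, rowAB' r3 h3]
    rfl
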